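-- pv_equiv track=rewrite | github.com/inkstar/OD_pre | 测试/0601B.py | check
-- ===== SOURCE A (Python) =====
-- def check(s:list):
--     flag=0
--     num0=0
--     ans=0
--     for i in s:
--         if flag==0 and i==0:
--             num0+=1
--         elif flag==0 and i==1:
--             ans+=(num0)//2
--             num0=0
--             flag=1
--         elif flag==1 and i==0:
--             num0+=1
--         elif flag==1 and i==1:
--             ans+=(num0-1)//2
--             num0=0
--     return ans
-- ===== SOURCE B (Python) =====
-- def check(s: list):
--     t = [x for x in s if x == 0 or x == 1]
--     ones = [i for i, x in enumerate(t) if x == 1]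
--     if not ones:
--         return 0
--     return ones[0] // 2 + sum((b - a - 2) // 2 for a, b in zip(ones, ones[1:]))
-- ===== Notes on version B (the rewrite author's own statement) =====
-- stated objective: alternative
-- what changed: Replaces A's stateful flag/counter fold with a declarative formula: filter to 0/1 values, take the positions of the 1s, and sum the floor-halved first position plus (b-a-2)//2 over consecutive position pairs.
import Mathlib
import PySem

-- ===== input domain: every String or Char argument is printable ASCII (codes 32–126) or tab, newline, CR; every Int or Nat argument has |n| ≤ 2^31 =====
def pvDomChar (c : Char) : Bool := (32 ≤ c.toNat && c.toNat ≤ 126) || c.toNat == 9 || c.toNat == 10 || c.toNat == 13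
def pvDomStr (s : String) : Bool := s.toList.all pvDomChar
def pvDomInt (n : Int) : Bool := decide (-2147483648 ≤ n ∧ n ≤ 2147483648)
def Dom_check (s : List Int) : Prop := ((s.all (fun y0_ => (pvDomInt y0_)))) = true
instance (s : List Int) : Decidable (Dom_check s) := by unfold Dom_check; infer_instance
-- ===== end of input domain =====

-- B replaces A's stateful flag/counter fold with a closed formula over the positions of the 1s (alternative decomposition, same O(n) cost).

-- ===== PORT A =====
-- one step of A's for-loop over the state (flag, num0, ans)
def checkStep (st : Int × Int × Int) (i : Int) : Int × Int × Int :=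
  if st.1 = 0 ∧ i = 0 then (st.1, st.2.1 + 1, st.2.2)
  else if st.1 = 0 ∧ i = 1 then (1, 0, st.2.2 + PySem.Int.floordiv st.2.1 2)
  else if st.1 = 1 ∧ i = 0 then (st.1, st.2.1 + 1, st.2.2)
  else if st.1 = 1 ∧ i = 1 then (st.1, 0, st.2.2 + PySem.Int.floordiv (st.2.1 - 1) 2)
  else st

def check (s : List Int) : Int :=
  (s.foldl checkStep (0, 0, 0)).2.2

-- ===== PORT B =====
def check_alt (s : List Int) : Int :=
  let t := s.filter (fun x => x == 0 || x == 1)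
  let ones := ((PySem.List.enumerate t).filter (fun p => p.2 == 1)).map (fun p => p.1)
  match ones with
  | [] => 0
  | o :: _ =>
    -- ones[1:] on a list = ones.drop 1 (exact: slice from 1)
    PySem.Int.floordiv o 2 +
      (((ones.zip (ones.drop 1)).map (fun p => PySem.Int.floordiv (p.2 - p.1 - 2) 2)).sum)

-- ===== PRECONDITION & SPEC =====
def Spec_check (s : List Int) (out : Int) : Prop := out = check_alt s
instance (s : List Int) (out : Int) : Decidable (Spec_check s out) := by unfold Spec_check; infer_instance

-- ===== CLAIM (what is proved, stated in full; the proofs are below) =====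
def Claim_equal_check : Prop := ∀ (s : List Int), Dom_check s → Spec_check s (check s)

-- ===== LEMMAS AND PROOFS =====

-- common reference function: zeros-between-ones segments, seen = "a 1 has occurred"
def specF (seen : Bool) : List Int → Int → Int
  | [], _ => 0
  | x :: r, z =>
    if x = 1 then (if seen then PySem.Int.floordiv (z - 1) 2 else PySem.Int.floordiv z 2) + specF true r 0
    else specF seen r (z + 1)

-- positions of 1s starting the count at k
def onesFrom (t : List Int) (k : Int) : List Int :=
  ((PySem.List.enumerate t k).filter (fun p => p.2 == 1)).map (fun p => p.1)

def pairsSum (os : List Int) : Int :=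
  ((os.zip (os.drop 1)).map (fun p => PySem.Int.floordiv (p.2 - p.1 - 2) 2)).sum

theorem onesFrom_nil (k : Int) : onesFrom [] k = [] := rfl

theorem onesFrom_cons (x : Int) (r : List Int) (k : Int) :
    onesFrom (x :: r) k = if x = 1 then k :: onesFrom r (k + 1) else onesFrom r (k + 1) := by
  simp only [onesFrom, PySem.List.enumerate_cons, List.filter_cons]
  by_cases h : x = 1 <;> simp [h]

-- A's step is the identity on non-0/1 inputs
theorem checkStep_skip (st : Int × Int × Int) (i : Int) (h0 : i ≠ 0) (h1 : i ≠ 1) :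
    checkStep st i = st := by
  simp [checkStep, h0, h1]

-- A's fold ignores non-0/1 elements: it equals the fold over the filtered list
theorem foldl_filter_eq (s : List Int) (st : Int × Int × Int) :
    s.foldl checkStep st = (s.filter (fun x => x == 0 || x == 1)).foldl checkStep st := by
  induction s generalizing st with
  | nil => rfl
  | cons x r ih =>
    by_cases h0 : x = 0
    · simp [h0, List.foldl_cons, ih]
    · by_cases h1 : x = 1
      · simp [h1, List.foldl_cons, ih]
      · simp [h0, h1, List.foldl_cons, checkStep_skip _ _ h0 h1, ih]

-- A's loop invariant over 0/1-only lists: the answer accumulates specF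
theorem foldA_spec (t : List Int) (hbin : ∀ x ∈ t, x = 0 ∨ x = 1) (b : Bool) (z a : Int) :
    (t.foldl checkStep ((if b then 1 else 0), z, a)).2.2 = a + specF b t z := by
  induction t generalizing b z a with
  | nil => simp [specF]
  | cons x r ih =>
    have hx := hbin x (by simp)
    have hbin' : ∀ y ∈ r, y = 0 ∨ y = 1 := fun y hy => hbin y (by simp [hy])
    rcases hx with h0 | h1
    · subst h0
      have hstep : checkStep ((if b then 1 else 0), z, a) 0 = ((if b then 1 else 0), z + 1, a) := by
        cases b <;> simp [checkStep]
      have hs : specF b (0 :: r) z = specF b r (z + 1) := by cases b <;> simp [specF]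
      rw [List.foldl_cons, hstep, hs]
      exact ih hbin' b (z + 1) a
    · subst h1
      cases b with
      | false =>
        have hstep : checkStep ((0 : Int), z, a) 1 = (1, 0, a + PySem.Int.floordiv z 2) := by
          simp [checkStep]
        have hs : specF false (1 :: r) z = PySem.Int.floordiv z 2 + specF true r 0 := by
          simp [specF]
        rw [List.foldl_cons]
        show (List.foldl checkStep (checkStep ((0 : Int), z, a) 1) r).2.2 = a + specF false (1 :: r) z
        rw [hstep]
        calc (List.foldl checkStep (1, 0, a + PySem.Int.floordiv z 2) r).2.2
            = a + PySem.Int.floordiv z 2 + specF true r 0 :=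
              ih hbin' true 0 (a + PySem.Int.floordiv z 2)
          _ = a + specF false (1 :: r) z := by rw [hs]; ring
      | true =>
        have hstep : checkStep ((1 : Int), z, a) 1 = (1, 0, a + PySem.Int.floordiv (z - 1) 2) := by
          simp [checkStep]
        have hs : specF true (1 :: r) z = PySem.Int.floordiv (z - 1) 2 + specF true r 0 := by
          simp [specF]
        rw [List.foldl_cons]
        show (List.foldl checkStep (checkStep ((1 : Int), z, a) 1) r).2.2 = a + specF true (1 :: r) z
        rw [hstep]
        calc (List.foldl checkStep (1, 0, a + PySem.Int.floordiv (z - 1) 2) r).2.2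
            = a + PySem.Int.floordiv (z - 1) 2 + specF true r 0 :=
              ih hbin' true 0 (a + PySem.Int.floordiv (z - 1) 2)
          _ = a + specF true (1 :: r) z := by rw [hs]; ring

-- the positions formula, parametrised by the offset w already folded into the head position
def formulaF (os : List Int) (w : Int) : Int :=
  match os with
  | [] => 0
  | o :: _ => PySem.Int.floordiv (w + o) 2 + pairsSum os

theorem pairsSum_cons_cons (k o : Int) (rest : List Int) :
    pairsSum (k :: o :: rest) = PySem.Int.floordiv (o - k - 2) 2 + pairsSum (o :: rest) := by
  simp [pairsSum]

theorem formulaF_cons (k : Int) (os : List Int) (w : Int) :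
    formulaF (k :: os) w = PySem.Int.floordiv (w + k) 2 + formulaF os (-k - 2) := by
  cases os with
  | nil => simp [formulaF, pairsSum]
  | cons o rest =>
    have e : (-k - 2 + o) = o - k - 2 := by ring
    simp only [formulaF, e, pairsSum_cons_cons]

-- specF equals the positions formula, with the position count started at k
theorem specF_formula (t : List Int) (z k : Int) :
    (specF false t z = formulaF (onesFrom t k) (z - k)) ∧
    (specF true t z = formulaF (onesFrom t k) (z - k - 1)) := by
  induction t generalizing z k with
  | nil => simp [specF, onesFrom_nil, formulaF]
  | cons x r ih =>
    by_cases hx : x = 1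
    · subst hx
      have hcons : onesFrom (1 :: r) k = k :: onesFrom r (k + 1) := by
        rw [onesFrom_cons]; simp
      have h1 := (ih 0 (k + 1)).2
      have hz0 : (0 : Int) - (k + 1) - 1 = -k - 2 := by ring
      rw [hz0] at h1
      constructor
      · have hs : specF false (1 :: r) z = PySem.Int.floordiv z 2 + specF true r 0 := by
          simp [specF]
        rw [hs, hcons, formulaF_cons, h1]
        have e : z - k + k = z := by ring
        rw [e]
      · have hs : specF true (1 :: r) z = PySem.Int.floordiv (z - 1) 2 + specF true r 0 := by
          simp [specF]
        rw [hs, hcons, formulaF_cons, h1]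
        have e : z - k - 1 + k = z - 1 := by ring
        rw [e]
    · have hcons : onesFrom (x :: r) k = onesFrom r (k + 1) := by
        rw [onesFrom_cons, if_neg hx]
      have hf := (ih (z + 1) (k + 1)).1
      have hg := (ih (z + 1) (k + 1)).2
      have hz : z + 1 - (k + 1) = z - k := by ring
      rw [hz] at hf hg
      constructor
      · have hs : specF false (x :: r) z = specF false r (z + 1) := by simp [specF, hx]
        rw [hs, hcons, hf]
      · have hs : specF true (x :: r) z = specF true r (z + 1) := by simp [specF, hx]
        rw [hs, hcons, hg]

-- ===== VERDICT (by name: the statement is the Claim_ definition above) =====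
theorem check_spec : Claim_equal_check := by
  intro s _
  show check s = check_alt s
  have hbin : ∀ x ∈ s.filter (fun x => x == 0 || x == 1), x = 0 ∨ x = 1 := by
    intro x hx
    have := List.of_mem_filter hx
    simpa using this
  have h1 : check s = specF false (s.filter (fun x => x == 0 || x == 1)) 0 := by
    have := foldA_spec (s.filter (fun x => x == 0 || x == 1)) hbin false 0 0
    simp only [if_neg (by simp : ¬ (false = true)), zero_add] at this
    rw [check, foldl_filter_eq]
    exact this
  have h2 := (specF_formula (s.filter (fun x => x == 0 || x == 1)) 0 0).1
  rw [h1, h2]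
  simp only [check_alt, onesFrom]
  rcases ho : ((PySem.List.enumerate (s.filter (fun x => x == 0 || x == 1))).filter
      (fun p => p.2 == 1)).map (fun p => p.1) with _ | ⟨o, rest⟩
  · rw [ho]
    simp [formulaF]
  · rw [ho]
    have e : (0 : Int) - 0 + o = o := by ring
    simp only [formulaF, pairsSum, e]
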